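-- pv_equiv track=rewrite | github.com/mourisl/T1K | CFTR/1_Create_Reference_Files/VariantMappingAndMutantEnsemblFormatUtils.py | create_mutant_Ensembl_format
-- ===== SOURCE A (Python) =====
-- def create_mutant_Ensembl_format(new_list):
--     """
--     Generate the mutant Ensembl coordinate format based on region names and base pair counts.
--
--     Each region in new_list is assigned a start and end coordinate in a continuous system.
--
--     Parameters:
--         new_list (list): A list of tuples (region_label, base_pair_count).
--
--     Returns:
--         list: A list of tuples (region_label, start_coordinate, end_coordinate, base_pair_count).
--     """
--     pos0 = 0
--     results = []
--
--     for region_label, length in new_list: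
--         pos1 = pos0 + length - 1
--         results.append((region_label, pos0, pos1, length))
--         pos0 = pos1 + 1
--
--     return results
-- ===== SOURCE B (Python) =====
-- def create_mutant_Ensembl_format(new_list):
--     # Phase 1: prefix-sum table of start coordinates.
--     starts = [0]
--     for _, length in new_list:
--         starts.append(starts[-1] + length)
--     # Phase 2: build tuples from the precomputed table.
--     return [(label, start, start + length - 1, length)
--             for (label, length), start in zip(new_list, starts)]
-- ===== Notes on version B (the rewrite author's own statement) =====
-- stated objective: idiomatic
-- what changed: Replaces the single loop threading a mutable running offset through each appended tuple by a two-phase decomposition: first a prefix-sum table of start coordinates, then a zip/comprehension building each tuple from the table.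
import Mathlib
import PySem

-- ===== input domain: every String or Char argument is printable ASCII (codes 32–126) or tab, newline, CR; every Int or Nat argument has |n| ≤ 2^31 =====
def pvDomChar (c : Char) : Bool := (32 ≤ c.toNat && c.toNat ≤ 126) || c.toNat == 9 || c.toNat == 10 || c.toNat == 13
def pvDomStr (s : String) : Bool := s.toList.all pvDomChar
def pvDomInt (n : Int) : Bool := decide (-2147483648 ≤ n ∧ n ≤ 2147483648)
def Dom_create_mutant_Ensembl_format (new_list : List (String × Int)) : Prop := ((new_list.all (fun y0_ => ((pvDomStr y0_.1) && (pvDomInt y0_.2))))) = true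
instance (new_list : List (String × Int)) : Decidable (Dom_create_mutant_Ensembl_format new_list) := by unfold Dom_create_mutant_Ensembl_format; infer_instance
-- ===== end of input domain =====

-- B replaces the offset-threading loop by a precomputed prefix-sum table of starts plus a zip build (idiomatic two-phase decomposition).


-- ===== PORT A =====
-- loop of A: threads pos0 through the list, appending one tuple per region
def cmefA_go (pos0 : Int) : List (String × Int) → List (String × Int × Int × Int)
  | [] => []
  | (region_label, length) :: rest =>
      (region_label, pos0, pos0 + length - 1, length) :: cmefA_go (pos0 + length - 1 + 1) rest

def create_mutant_Ensembl_format (new_list : List (String × Int)) : List (String × Int × Int × Int) :=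
  cmefA_go 0 new_list

-- ===== PORT B =====
-- B, phase 1: starts.append(starts[-1] + length); starts is always nonempty, getLastD _ 0 = starts[-1]
def cmefB_step (starts : List Int) (p : String × Int) : List Int :=
  starts ++ [starts.getLastD 0 + p.2]

def create_mutant_Ensembl_format_alt (new_list : List (String × Int)) : List (String × Int × Int × Int) :=
  let starts := new_list.foldl cmefB_step [0]
  (new_list.zip starts).map (fun q => (q.1.1, q.2, q.2 + q.1.2 - 1, q.1.2))

-- ===== PRECONDITION & SPEC =====
def Spec_create_mutant_Ensembl_format (new_list : List (String × Int)) (out : List (String × Int × Int × Int)) : Prop := out = create_mutant_Ensembl_format_alt new_list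
instance (new_list : List (String × Int)) (out : List (String × Int × Int × Int)) : Decidable (Spec_create_mutant_Ensembl_format new_list out) := by unfold Spec_create_mutant_Ensembl_format; infer_instance

-- ===== CLAIM (what is proved, stated in full; the proofs are below) =====
def Claim_equal_create_mutant_Ensembl_format : Prop := ∀ (new_list : List (String × Int)), Dom_create_mutant_Ensembl_format new_list → Spec_create_mutant_Ensembl_format new_list (create_mutant_Ensembl_format new_list)

-- ===== LEMMAS AND PROOFS =====

-- the tail of the start table produced by the fold, as a direct recursion
def cmefDeltas (s : Int) : List (String × Int) → List Int
  | [] => []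
  | (_, l) :: rest => (s + l) :: cmefDeltas (s + l) rest

theorem cmef_fold_eq (l : List (String × Int)) : ∀ (acc : List Int) (x : Int),
    l.foldl cmefB_step (acc ++ [x]) = acc ++ x :: cmefDeltas x l := by
  induction l with
  | nil => intro acc x; simp [cmefDeltas]
  | cons h t ih =>
      intro acc x
      obtain ⟨lab, len⟩ := h
      simp only [List.foldl_cons, cmefB_step, List.getLastD_concat, cmefDeltas]
      have := ih (acc ++ [x]) (x + len)
      simpa using this

theorem cmef_zip_eq (l : List (String × Int)) : ∀ (s : Int),
    (l.zip (s :: cmefDeltas s l)).map (fun q => (q.1.1, q.2, q.2 + q.1.2 - 1, q.1.2))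
      = cmefA_go s l := by
  induction l with
  | nil => intro s; rfl
  | cons h t ih =>
      intro s
      obtain ⟨lab, len⟩ := h
      simp only [cmefDeltas, List.zip_cons_cons, List.map_cons, cmefA_go]
      have := ih (s + len)
      rw [show s + len - 1 + 1 = s + len by ring, this]

-- ===== VERDICT (by name: the statement is the Claim_ definition above) =====
theorem create_mutant_Ensembl_format_spec : Claim_equal_create_mutant_Ensembl_format := by
  intro new_list _
  unfold Spec_create_mutant_Ensembl_format create_mutant_Ensembl_format create_mutant_Ensembl_format_alt
  have h := cmef_fold_eq new_list [] 0
  simp only [List.nil_append] at h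
  rw [h]
  exact (cmef_zip_eq new_list 0).symm
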